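-- pv_equiv track=rewrite | github.com/aa694849243/leetcode_cj | 2001-2100/2060. 同源字符串检测.py | possiblyEquals
-- ===== SOURCE A (Python) =====
-- import functools
--
-- def possiblyEquals(s1: str, s2: str) -> bool:
--     m, n = len(s1), len(s2)
--
--     @functools.lru_cache(None)
--     def dfs(i, j, which, rest):
--         if which == 0:
--             if j == n:
--                 return i == m and rest == 0
--             elif s2[j].isalpha():
--                 if i < m and s1[i].isalpha() and rest == 0:
--                     return dfs(i + 1, j + 1, 0, 0) if s1[i] == s2[j] else False
--                 elif i < m and rest == 0 and s1[i].isdigit():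
--                     return dfs(i, j + 1, 1, 1)
--                 elif rest > 0:
--                     return dfs(i, j + 1, 0, rest - 1)
--             elif s2[j].isdigit():
--                 x, k = 0, j
--                 while k < n and s2[k].isdigit():
--                     x = x * 10 + int(s2[k])
--                     if (rest > x and dfs(i, k + 1, 0, rest - x)) or (x >= rest and dfs(i, k + 1, 1, x - rest)):
--                         return True
--                     k += 1
--             return False
--         else:
--             if i == m:
--                 return j == n and rest == 0
--             elif s1[i].isalpha():
--                 if j < n and s2[j].isalpha() and rest == 0:
--                     return dfs(i + 1, j + 1, 0, 0) if s1[i] == s2[j] else False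
--                 elif j < n and rest == 0 and s2[j].isdigit():
--                     return dfs(i + 1, j, 0, 1)
--                 elif rest > 0:
--                     return dfs(i + 1, j, 1, rest - 1)
--             elif s1[i].isdigit():
--                 x, k = 0, i
--                 while k < m and s1[k].isdigit():
--                     x = x * 10 + int(s1[k])
--                     if (dfs(k + 1, j, 1, rest - x) and rest > x) or (dfs(k + 1, j, 0, x - rest) and rest <= x):
--                         return True
--                     k += 1
--             return False
--
--     ans = dfs(0, 0, 0, 0)
--     dfs.cache_clear()
--     return ans
-- ===== SOURCE B (Python) =====
-- def possiblyEquals(s1: str, s2: str) -> bool: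
--     # Layered breadth-first reachability over states (i, j, d), where d is the signed
--     # committed-length surplus of s1 over s2: the answer is whether (len(s1), len(s2), 0)
--     # is reachable from (0, 0, 0).  Since every transition advances i + j, at most
--     # len(s1) + len(s2) + 1 frontier layers are needed.
--     m, n = len(s1), len(s2)
--
--     def successors(state):
--         i, j, d = state
--         out = []
--         if d > 0:
--             if j < n:
--                 if s2[j].isdigit():
--                     x, k = 0, j
--                     while k < n and s2[k].isdigit():
--                         x = x * 10 + int(s2[k])
--                         k += 1
--                         out.append((i, k, d - x))
--                 elif s2[j].isalpha():
--                     out.append((i, j + 1, d - 1))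
--         elif d < 0:
--             if i < m:
--                 if s1[i].isdigit():
--                     x, k = 0, i
--                     while k < m and s1[k].isdigit():
--                         x = x * 10 + int(s1[k])
--                         k += 1
--                         out.append((k, j, d + x))
--                 elif s1[i].isalpha():
--                     out.append((i + 1, j, d + 1))
--         else:
--             if i < m and s1[i].isdigit():
--                 x, k = 0, i
--                 while k < m and s1[k].isdigit():
--                     x = x * 10 + int(s1[k])
--                     k += 1
--                     out.append((k, j, x))
--             elif j < n and s2[j].isdigit():
--                 x, k = 0, j
--                 while k < n and s2[k].isdigit():
--                     x = x * 10 + int(s2[k])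
--                     k += 1
--                     out.append((i, k, -x))
--             elif i < m and j < n and s1[i].isalpha() and s2[j].isalpha() and s1[i] == s2[j]:
--                 out.append((i + 1, j + 1, 0))
--         return out
--
--     goal = (m, n, 0)
--     frontier = {(0, 0, 0)}
--     for _ in range(m + n + 1):
--         if goal in frontier:
--             return True
--         nxt = set()
--         for st in frontier:
--             nxt.update(successors(st))
--         frontier = nxt
--     return goal in frontier
-- ===== Notes on version B (the rewrite author's own statement) =====
-- stated objective: alternative
-- what changed: Replaces A's top-down memoized DFS with (which, rest) state and mirrored branches by a bottom-up layered breadth-first reachability computation: an explicit successor function on states (i, j, signed-diff) and an iterative frontier-set loop that asks whether the accepting state (m, n, 0) is ever reached from (0, 0, 0).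
-- outside the precondition, e.g. on possiblyEquals('a0', 'a'): A returns False, B returns True; on possiblyEquals('a10', 'a1'): A returns False, B returns True
import Mathlib
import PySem

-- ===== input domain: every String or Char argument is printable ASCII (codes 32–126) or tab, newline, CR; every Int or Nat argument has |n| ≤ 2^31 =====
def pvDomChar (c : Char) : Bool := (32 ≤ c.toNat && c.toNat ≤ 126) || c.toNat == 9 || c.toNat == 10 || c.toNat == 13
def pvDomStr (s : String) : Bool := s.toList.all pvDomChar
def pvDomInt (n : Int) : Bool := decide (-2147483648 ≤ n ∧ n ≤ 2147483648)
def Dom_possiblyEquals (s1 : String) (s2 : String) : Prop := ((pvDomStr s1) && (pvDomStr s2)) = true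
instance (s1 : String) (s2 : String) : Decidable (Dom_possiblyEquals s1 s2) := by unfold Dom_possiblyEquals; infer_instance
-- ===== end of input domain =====

-- B replaces A's top-down memoized DFS over (i, j, which, rest) by an iterative layered
-- breadth-first reachability computation over states (i, j, signed-diff); equal return
-- value proved on inputs without the digit '0'.

-- ===== PORT A =====
-- shared with port B: both Pythons contain the identical digit-run while-loop
-- "x, k = 0, j; while k < len and s[k].isdigit(): x = x*10 + int(s[k]); k += 1; <use (x, k)>";
-- runPairs lists exactly the (x, k) pairs that loop offers to its body.
def pvDval (c : Char) : Int := (c.toNat : Int) - 48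

def pvRun (l : List Char) (j : Nat) : List Char := (l.drop j).takeWhile (fun c => c.isDigit)

def pvRunVal (l : List Char) (j t : Nat) : Int :=
  ((pvRun l j).take t).foldl (fun x c => x * 10 + pvDval c) 0

def runPairs (l : List Char) (j : Nat) : List (Int × Nat) :=
  (List.range (pvRun l j).length).map (fun t => (pvRunVal l j (t + 1), j + t + 1))

-- fuel makes the recursion total; the top call supplies more fuel than the search depth m+n.
def dfsA (s1 s2 : List Char) : Nat → Nat → Nat → Int → Int → Bool
  | 0, _, _, _, _ => false
  | fuel + 1, i, j, which, rest =>
    if which == 0 then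
      if j = s2.length then decide (i = s1.length) && decide (rest = 0)
      else if h : j < s2.length then
        if (s2[j]).isAlpha then
          if hi : i < s1.length then
            if (s1[i]).isAlpha && rest == 0 then
              (if s1[i] == s2[j] then dfsA s1 s2 fuel (i + 1) (j + 1) 0 0 else false)
            else if rest == 0 && (s1[i]).isDigit then dfsA s1 s2 fuel i (j + 1) 1 1
            else if rest > 0 then dfsA s1 s2 fuel i (j + 1) 0 (rest - 1)
            else false
          else if rest > 0 then dfsA s1 s2 fuel i (j + 1) 0 (rest - 1)
          else false
        else if (s2[j]).isDigit then
          (runPairs s2 j).any (fun p =>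
            (decide (rest > p.1) && dfsA s1 s2 fuel i p.2 0 (rest - p.1)) ||
            (decide (p.1 ≥ rest) && dfsA s1 s2 fuel i p.2 1 (p.1 - rest)))
        else false
      else false
    else
      if i = s1.length then decide (j = s2.length) && decide (rest = 0)
      else if h : i < s1.length then
        if (s1[i]).isAlpha then
          if hj : j < s2.length then
            if (s2[j]).isAlpha && rest == 0 then
              (if s1[i] == s2[j] then dfsA s1 s2 fuel (i + 1) (j + 1) 0 0 else false)
            else if rest == 0 && (s2[j]).isDigit then dfsA s1 s2 fuel (i + 1) j 0 1
            else if rest > 0 then dfsA s1 s2 fuel (i + 1) j 1 (rest - 1)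
            else false
          else if rest > 0 then dfsA s1 s2 fuel (i + 1) j 1 (rest - 1)
          else false
        else if (s1[i]).isDigit then
          (runPairs s1 i).any (fun p =>
            (dfsA s1 s2 fuel p.2 j 1 (rest - p.1) && decide (rest > p.1)) ||
            (dfsA s1 s2 fuel p.2 j 0 (p.1 - rest) && decide (rest ≤ p.1)))
        else false
      else false

def possiblyEquals (s1 : String) (s2 : String) : Bool :=
  dfsA s1.toList s2.toList (s1.toList.length + s2.toList.length + 1) 0 0 0 0

-- ===== PORT B =====
-- Source B's `successors(state)`: the list of states one transition away from (i, j, d)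
def pvSuccs (s1 s2 : List Char) : Nat × Nat × Int → List (Nat × Nat × Int)
  | (i, j, d) =>
    if d > 0 then
      if h : j < s2.length then
        if (s2[j]).isDigit then (runPairs s2 j).map (fun p => (i, p.2, d - p.1))
        else if (s2[j]).isAlpha then [(i, j + 1, d - 1)]
        else []
      else []
    else if d < 0 then
      if h : i < s1.length then
        if (s1[i]).isDigit then (runPairs s1 i).map (fun p => (p.2, j, d + p.1))
        else if (s1[i]).isAlpha then [(i + 1, j, d + 1)]
        else []
      else []
    else
      if hi : i < s1.length then
        if (s1[i]).isDigit then (runPairs s1 i).map (fun p => (p.2, j, p.1))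
        else if hj : j < s2.length then
          if (s2[j]).isDigit then (runPairs s2 j).map (fun p => (i, p.2, -p.1))
          else if (s1[i]).isAlpha && (s2[j]).isAlpha && (s1[i] == s2[j]) then [(i + 1, j + 1, (0 : Int))]
          else []
        else []
      else if hj : j < s2.length then
        if (s2[j]).isDigit then (runPairs s2 j).map (fun p => (i, p.2, -p.1))
        else []
      else []

-- Source B's "nxt = set(); for st in frontier: nxt.update(successors(st))"
def pvStepSet (s1 s2 : List Char) (F : List (Nat × Nat × Int)) : List (Nat × Nat × Int) :=
  F.foldl (fun acc st => PySem.Set.update acc (pvSuccs s1 s2 st)) PySem.Set.empty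

-- Source B's "for _ in range(m+n+1): if goal in frontier: return True; frontier = nxt" + final test
def pvBfs (s1 s2 : List Char) : Nat → List (Nat × Nat × Int) → Bool
  | 0, F => F.contains (s1.length, s2.length, (0 : Int))
  | t + 1, F =>
    if F.contains (s1.length, s2.length, (0 : Int)) then true
    else pvBfs s1 s2 t (pvStepSet s1 s2 F)

def possiblyEquals_alt (s1 : String) (s2 : String) : Bool :=
  pvBfs s1.toList s2.toList (s1.toList.length + s2.toList.length + 1) [(0, 0, (0 : Int))]

-- ===== PRECONDITION & SPEC =====
-- Pre_ excludes strings containing the digit '0' (outside the problem's guarantee that every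
-- number is '0'-free): on zero-valued number prefixes A's accept/reject is asymmetric and
-- accidental (it accepts "a"/"a0" but rejects "a0"/"a"), a corner no one would specify.
def Pre_possiblyEquals (s1 : String) (s2 : String) : Prop :=
  '0' ∉ s1.toList ∧ '0' ∉ s2.toList
instance (s1 : String) (s2 : String) : Decidable (Pre_possiblyEquals s1 s2) := by
  unfold Pre_possiblyEquals; infer_instance

def pvWitness_possiblyEquals : String × String := ("a2", "abc")

def Spec_possiblyEquals (s1 : String) (s2 : String) (out : Bool) : Prop := out = possiblyEquals_alt s1 s2
instance (s1 : String) (s2 : String) (out : Bool) : Decidable (Spec_possiblyEquals s1 s2 out) := by unfold Spec_possiblyEquals; infer_instance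

-- ===== CLAIM (what is proved, stated in full; the proofs are below) =====
def Claim_equal_possiblyEquals : Prop := ∀ (s1 : String) (s2 : String), Dom_possiblyEquals s1 s2 → Pre_possiblyEquals s1 s2 → Spec_possiblyEquals s1 s2 (possiblyEquals s1 s2)

-- ===== LEMMAS AND PROOFS =====

theorem digit_toNat {c : Char} (h : c.isDigit = true) : 48 ≤ c.toNat ∧ c.toNat ≤ 57 := by
  simp [Char.isDigit] at h
  obtain ⟨h1, h2⟩ := h
  exact ⟨by simpa using UInt32.le_iff_toNat_le.mp h1, by simpa using UInt32.le_iff_toNat_le.mp h2⟩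

theorem alpha_toNat {c : Char} (h : c.isAlpha = true) :
    (65 ≤ c.toNat ∧ c.toNat ≤ 90) ∨ (97 ≤ c.toNat ∧ c.toNat ≤ 122) := by
  simp [Char.isAlpha, Char.isUpper, Char.isLower] at h
  rcases h with ⟨h1, h2⟩ | ⟨h1, h2⟩
  · exact Or.inl ⟨by simpa using UInt32.le_iff_toNat_le.mp h1, by simpa using UInt32.le_iff_toNat_le.mp h2⟩
  · exact Or.inr ⟨by simpa using UInt32.le_iff_toNat_le.mp h1, by simpa using UInt32.le_iff_toNat_le.mp h2⟩

theorem alpha_not_digit {c : Char} (h : c.isAlpha = true) : c.isDigit = false := by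
  by_contra hc
  rcases alpha_toNat h with ⟨h1, _⟩ | ⟨h1, _⟩ <;>
    have := digit_toNat (by simpa using hc) <;> omega

theorem pvDval_ge_one {c : Char} (h : c.isDigit = true) (h0 : c ≠ '0') : 1 ≤ pvDval c := by
  have hb := digit_toNat h
  have hne : c.toNat ≠ 48 := by
    intro hc
    exact h0 (Char.ext (UInt32.toNat_inj.mp (by simpa using hc)))
  unfold pvDval; omega

theorem pvDval_nonneg {c : Char} (h : c.isDigit = true) : 0 ≤ pvDval c := by
  have hb := digit_toNat h; unfold pvDval; omega

theorem pvRun_subset {l : List Char} {j : Nat} : pvRun l j ⊆ l := by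
  intro c hc
  exact (List.drop_subset j l) ((List.takeWhile_sublist _).subset hc)

theorem pvRun_digit {l : List Char} {j : Nat} {c : Char} (hc : c ∈ pvRun l j) :
    c.isDigit = true := List.mem_takeWhile_imp hc

theorem runPairs_mem {l : List Char} {j : Nat} {p : Int × Nat} (hp : p ∈ runPairs l j) :
    j < p.2 ∧ p.2 ≤ l.length := by
  unfold runPairs at hp
  simp only [List.mem_map, List.mem_range] at hp
  obtain ⟨t, ht, rfl⟩ := hp
  have h1 : (pvRun l j).length ≤ l.length - j := by
    have := (List.takeWhile_sublist (fun c => c.isDigit) (l := l.drop j)).length_le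
    simpa [pvRun] using this
  simp only
  omega

theorem foldl_ge_one : ∀ (w : List Char) (x : Int), (∀ c ∈ w, c.isDigit = true) → 1 ≤ x →
    1 ≤ w.foldl (fun x c => x * 10 + pvDval c) x := by
  intro w
  induction w with
  | nil => intro x _ hx; simpa using hx
  | cons c w ih =>
    intro x hd hx
    simp only [List.foldl_cons]
    refine ih _ (fun c hc => hd c (List.mem_cons_of_mem _ hc)) ?_
    have := pvDval_nonneg (hd c (List.mem_cons_self ..))
    nlinarith

theorem runPairs_pos {l : List Char} {j : Nat} (h0 : '0' ∉ l) {p : Int × Nat}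
    (hp : p ∈ runPairs l j) : 1 ≤ p.1 := by
  unfold runPairs at hp
  simp only [List.mem_map, List.mem_range] at hp
  obtain ⟨t, ht, rfl⟩ := hp
  simp only
  unfold pvRunVal
  rcases hrun : pvRun l j with _ | ⟨c, w⟩
  · rw [hrun] at ht; simp at ht
  · have hcd : c.isDigit = true := pvRun_digit (by rw [hrun]; exact List.mem_cons_self ..)
    have hc0 : c ≠ '0' := fun h => h0 (pvRun_subset (by rw [hrun, h]; exact List.mem_cons_self ..))
    simp only [List.take_succ_cons, List.foldl_cons, zero_mul, zero_add]
    refine foldl_ge_one _ _ (fun c' hc' => pvRun_digit (l := l) (j := j) ?_) (pvDval_ge_one hcd hc0)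
    rw [hrun]
    exact List.mem_cons_of_mem _ ((List.take_sublist _ _).subset hc')

theorem anyCongr {α : Type} {l : List α} {f g : α → Bool} (h : ∀ a ∈ l, f a = g a) :
    l.any f = l.any g := by
  induction l with
  | nil => rfl
  | cons a l ih =>
    simp only [List.any_cons, h a (List.mem_cons_self ..),
      ih (fun b hb => h b (List.mem_cons_of_mem _ hb))]

theorem anySwap {α β : Type} (l1 : List α) (l2 : List β) (f : α → β → Bool) :
    (l1.any fun a => l2.any fun b => f a b) = (l2.any fun b => l1.any fun a => f a b) := by
  rw [Bool.eq_iff_iff]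
  simp only [List.any_eq_true]
  tauto

-- dfsB: the signed-diff recursion used as the BRIDGE between the two ports: it is the
-- "one recursive unfolding" view of B's successor graph (dfsB_char below) and is compared
-- branch-by-branch with dfsA in main_AB.
def dfsB (s1 s2 : List Char) : Nat → Nat → Nat → Int → Bool
  | 0, _, _, _ => false
  | fuel + 1, i, j, d =>
    if d > 0 then
      if h : j < s2.length then
        if (s2[j]).isDigit then
          (runPairs s2 j).any (fun p => dfsB s1 s2 fuel i p.2 (d - p.1))
        else if (s2[j]).isAlpha then dfsB s1 s2 fuel i (j + 1) (d - 1)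
        else false
      else false
    else if d < 0 then
      if h : i < s1.length then
        if (s1[i]).isDigit then
          (runPairs s1 i).any (fun p => dfsB s1 s2 fuel p.2 j (d + p.1))
        else if (s1[i]).isAlpha then dfsB s1 s2 fuel (i + 1) j (d + 1)
        else false
      else false
    else
      if i = s1.length ∧ j = s2.length then true
      else if hi : i < s1.length then
        if (s1[i]).isDigit then
          (runPairs s1 i).any (fun p => dfsB s1 s2 fuel p.2 j p.1)
        else if hj : j < s2.length then
          if (s2[j]).isDigit then
            (runPairs s2 j).any (fun p => dfsB s1 s2 fuel i p.2 (-p.1))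
          else if (s1[i]).isAlpha && (s2[j]).isAlpha then
            (s1[i] == s2[j]) && dfsB s1 s2 fuel (i + 1) (j + 1) 0
          else false
        else false
      else if hj : j < s2.length then
        if (s2[j]).isDigit then
          (runPairs s2 j).any (fun p => dfsB s1 s2 fuel i p.2 (-p.1))
        else false
      else false

-- step lemmas for the two recursions

theorem Bdead_pos {s1 s2 : List Char} {f i j : Nat} {d : Int} (hd : 0 < d)
    (hj : s2.length ≤ j) : dfsB s1 s2 f i j d = false := by
  cases f with
  | zero => rfl
  | succ f => simp [dfsB, hd, show ¬ (j < s2.length) by omega]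

theorem Bdead_pos_bad {s1 s2 : List Char} {f i j : Nat} {d : Int} (hd : 0 < d)
    (hj : j < s2.length) (h1 : (s2[j]).isDigit = false) (h2 : (s2[j]).isAlpha = false) :
    dfsB s1 s2 f i j d = false := by
  cases f with
  | zero => rfl
  | succ f => simp [dfsB, hd, hj, h1, h2]

theorem Bpos_digit {s1 s2 : List Char} {f i j : Nat} {d : Int} (hd : 0 < d)
    (hj : j < s2.length) (h1 : (s2[j]).isDigit = true) :
    dfsB s1 s2 (f + 1) i j d = (runPairs s2 j).any (fun p => dfsB s1 s2 f i p.2 (d - p.1)) := by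
  simp [dfsB, hd, hj, h1]

theorem Bpos_alpha {s1 s2 : List Char} {f i j : Nat} {d : Int} (hd : 0 < d)
    (hj : j < s2.length) (h1 : (s2[j]).isDigit = false) (h2 : (s2[j]).isAlpha = true) :
    dfsB s1 s2 (f + 1) i j d = dfsB s1 s2 f i (j + 1) (d - 1) := by
  simp [dfsB, hd, hj, h1, h2]

theorem Bdead_neg {s1 s2 : List Char} {f i j : Nat} {d : Int} (hd : d < 0)
    (hi : s1.length ≤ i) : dfsB s1 s2 f i j d = false := by
  cases f with
  | zero => rfl
  | succ f => simp [dfsB, hd, show ¬ (0 < d) by omega, show ¬ (i < s1.length) by omega]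

theorem Bdead_neg_bad {s1 s2 : List Char} {f i j : Nat} {d : Int} (hd : d < 0)
    (hi : i < s1.length) (h1 : (s1[i]).isDigit = false) (h2 : (s1[i]).isAlpha = false) :
    dfsB s1 s2 f i j d = false := by
  cases f with
  | zero => rfl
  | succ f => simp [dfsB, hd, show ¬ (0 < d) by omega, hi, h1, h2]

theorem Bneg_digit {s1 s2 : List Char} {f i j : Nat} {d : Int} (hd : d < 0)
    (hi : i < s1.length) (h1 : (s1[i]).isDigit = true) :
    dfsB s1 s2 (f + 1) i j d = (runPairs s1 i).any (fun p => dfsB s1 s2 f p.2 j (d + p.1)) := by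
  simp [dfsB, hd, show ¬ (0 < d) by omega, hi, h1]

theorem Bneg_alpha {s1 s2 : List Char} {f i j : Nat} {d : Int} (hd : d < 0)
    (hi : i < s1.length) (h1 : (s1[i]).isDigit = false) (h2 : (s1[i]).isAlpha = true) :
    dfsB s1 s2 (f + 1) i j d = dfsB s1 s2 f (i + 1) j (d + 1) := by
  simp [dfsB, hd, show ¬ (0 < d) by omega, hi, h1, h2]

-- A second-step lemmas
theorem Astep1_digit {s1 s2 : List Char} {f i j : Nat} {r : Int}
    (hi : i < s1.length) (hA : (s1[i]).isAlpha = false) (hD : (s1[i]).isDigit = true) :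
    dfsA s1 s2 (f + 1) i j 1 r = (runPairs s1 i).any (fun p =>
      (dfsA s1 s2 f p.2 j 1 (r - p.1) && decide (r > p.1)) ||
      (dfsA s1 s2 f p.2 j 0 (p.1 - r) && decide (r ≤ p.1))) := by
  simp [dfsA, show ¬ (i = s1.length) by omega, hi, hA, hD]

theorem Astep0_digit {s1 s2 : List Char} {f i j : Nat} {r : Int}
    (hj : j < s2.length) (hA : (s2[j]).isAlpha = false) (hD : (s2[j]).isDigit = true) :
    dfsA s1 s2 (f + 1) i j 0 r = (runPairs s2 j).any (fun p =>
      (decide (r > p.1) && dfsA s1 s2 f i p.2 0 (r - p.1)) ||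
      (decide (p.1 ≥ r) && dfsA s1 s2 f i p.2 1 (p.1 - r))) := by
  simp [dfsA, show ¬ (j = s2.length) by omega, hj, hA, hD]

theorem A0_end {s1 s2 : List Char} {f i j : Nat} {r : Int} (hj : j = s2.length) :
    dfsA s1 s2 (f + 1) i j 0 r = (decide (i = s1.length) && decide (r = 0)) := by
  simp [dfsA, hj]

theorem A0_oob {s1 s2 : List Char} {f i j : Nat} {r : Int} (hj : s2.length < j) :
    dfsA s1 s2 (f + 1) i j 0 r = false := by
  simp [dfsA, show ¬ (j = s2.length) by omega, show ¬ (j < s2.length) by omega]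

theorem A0_alpha_match {s1 s2 : List Char} {f i j : Nat} (hj : j < s2.length)
    (ha : (s2[j]).isAlpha = true) (hi : i < s1.length) (hia : (s1[i]).isAlpha = true) :
    dfsA s1 s2 (f + 1) i j 0 0 =
      (if s1[i] == s2[j] then dfsA s1 s2 f (i + 1) (j + 1) 0 0 else false) := by
  simp [dfsA, show ¬ (j = s2.length) by omega, hj, ha, hi, hia]

theorem A0_alpha_digit {s1 s2 : List Char} {f i j : Nat} (hj : j < s2.length)
    (ha : (s2[j]).isAlpha = true) (hi : i < s1.length) (hia : (s1[i]).isAlpha = false)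
    (hid : (s1[i]).isDigit = true) :
    dfsA s1 s2 (f + 1) i j 0 0 = dfsA s1 s2 f i (j + 1) 1 1 := by
  simp [dfsA, show ¬ (j = s2.length) by omega, hj, ha, hi, hia, hid]

theorem A0_alpha_rest {s1 s2 : List Char} {f i j : Nat} {r : Int} (hj : j < s2.length)
    (ha : (s2[j]).isAlpha = true) (hr : 0 < r) :
    dfsA s1 s2 (f + 1) i j 0 r = dfsA s1 s2 f i (j + 1) 0 (r - 1) := by
  have hr0 : (r == 0) = false := by simp; omega
  have hrp : decide (r > 0) = true := by simp; omega
  by_cases hi : i < s1.length <;>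
    simp [dfsA, show ¬ (j = s2.length) by omega, hj, ha, hi, hr0, hrp]

theorem A0_alpha_dead_hi {s1 s2 : List Char} {f i j : Nat} (hj : j < s2.length)
    (ha : (s2[j]).isAlpha = true) (hi : i < s1.length) (hia : (s1[i]).isAlpha = false)
    (hid : (s1[i]).isDigit = false) :
    dfsA s1 s2 (f + 1) i j 0 0 = false := by
  simp [dfsA, show ¬ (j = s2.length) by omega, hj, ha, hi, hia, hid]

theorem A0_alpha_dead_end {s1 s2 : List Char} {f i j : Nat} (hj : j < s2.length)
    (ha : (s2[j]).isAlpha = true) (hi : s1.length ≤ i) :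
    dfsA s1 s2 (f + 1) i j 0 0 = false := by
  simp [dfsA, show ¬ (j = s2.length) by omega, hj, ha, show ¬ (i < s1.length) by omega]

theorem A0_bad {s1 s2 : List Char} {f i j : Nat} {r : Int} (hj : j < s2.length)
    (ha : (s2[j]).isAlpha = false) (hd : (s2[j]).isDigit = false) :
    dfsA s1 s2 (f + 1) i j 0 r = false := by
  simp [dfsA, show ¬ (j = s2.length) by omega, hj, ha, hd]

theorem A1_end {s1 s2 : List Char} {f i j : Nat} {r : Int} (hi : i = s1.length) :
    dfsA s1 s2 (f + 1) i j 1 r = (decide (j = s2.length) && decide (r = 0)) := by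
  simp [dfsA, hi]

theorem A1_oob {s1 s2 : List Char} {f i j : Nat} {r : Int} (hi : s1.length < i) :
    dfsA s1 s2 (f + 1) i j 1 r = false := by
  simp [dfsA, show ¬ (i = s1.length) by omega, show ¬ (i < s1.length) by omega]

theorem A1_alpha_match {s1 s2 : List Char} {f i j : Nat} (hi : i < s1.length)
    (ha : (s1[i]).isAlpha = true) (hj : j < s2.length) (hja : (s2[j]).isAlpha = true) :
    dfsA s1 s2 (f + 1) i j 1 0 =
      (if s1[i] == s2[j] then dfsA s1 s2 f (i + 1) (j + 1) 0 0 else false) := by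
  simp [dfsA, show ¬ (i = s1.length) by omega, hi, ha, hj, hja]

theorem A1_alpha_digit {s1 s2 : List Char} {f i j : Nat} (hi : i < s1.length)
    (ha : (s1[i]).isAlpha = true) (hj : j < s2.length) (hja : (s2[j]).isAlpha = false)
    (hjd : (s2[j]).isDigit = true) :
    dfsA s1 s2 (f + 1) i j 1 0 = dfsA s1 s2 f (i + 1) j 0 1 := by
  simp [dfsA, show ¬ (i = s1.length) by omega, hi, ha, hj, hja, hjd]

theorem A1_alpha_rest {s1 s2 : List Char} {f i j : Nat} {r : Int} (hi : i < s1.length)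
    (ha : (s1[i]).isAlpha = true) (hr : 0 < r) :
    dfsA s1 s2 (f + 1) i j 1 r = dfsA s1 s2 f (i + 1) j 1 (r - 1) := by
  have hr0 : (r == 0) = false := by simp; omega
  have hrp : decide (r > 0) = true := by simp; omega
  by_cases hj : j < s2.length <;>
    simp [dfsA, show ¬ (i = s1.length) by omega, hi, ha, hj, hr0, hrp]

theorem A1_alpha_dead_hj {s1 s2 : List Char} {f i j : Nat} (hi : i < s1.length)
    (ha : (s1[i]).isAlpha = true) (hj : j < s2.length) (hja : (s2[j]).isAlpha = false)
    (hjd : (s2[j]).isDigit = false) :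
    dfsA s1 s2 (f + 1) i j 1 0 = false := by
  simp [dfsA, show ¬ (i = s1.length) by omega, hi, ha, hj, hja, hjd]

theorem A1_alpha_dead_end {s1 s2 : List Char} {f i j : Nat} (hi : i < s1.length)
    (ha : (s1[i]).isAlpha = true) (hj : s2.length ≤ j) :
    dfsA s1 s2 (f + 1) i j 1 0 = false := by
  simp [dfsA, show ¬ (i = s1.length) by omega, hi, ha, show ¬ (j < s2.length) by omega]

theorem A1_bad {s1 s2 : List Char} {f i j : Nat} {r : Int} (hi : i < s1.length)
    (ha : (s1[i]).isAlpha = false) (hd : (s1[i]).isDigit = false) :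
    dfsA s1 s2 (f + 1) i j 1 r = false := by
  simp [dfsA, show ¬ (i = s1.length) by omega, hi, ha, hd]

theorem B0_done {s1 s2 : List Char} {f i j : Nat} (hi : i = s1.length) (hj : j = s2.length) :
    dfsB s1 s2 (f + 1) i j 0 = true := by
  simp [dfsB, hi, hj]

theorem B0_digit1 {s1 s2 : List Char} {f i j : Nat} (hi : i < s1.length)
    (hd : (s1[i]).isDigit = true) :
    dfsB s1 s2 (f + 1) i j 0 = (runPairs s1 i).any (fun p => dfsB s1 s2 f p.2 j p.1) := by
  simp [dfsB, hi, hd, show ¬ (i = s1.length ∧ j = s2.length) from fun h => by omega]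

theorem B0_digit2_nd {s1 s2 : List Char} {f i j : Nat} (hi : i < s1.length)
    (h1 : (s1[i]).isDigit = false) (hj : j < s2.length) (hd : (s2[j]).isDigit = true) :
    dfsB s1 s2 (f + 1) i j 0 = (runPairs s2 j).any (fun p => dfsB s1 s2 f i p.2 (-p.1)) := by
  simp [dfsB, hi, h1, hj, hd, show ¬ (i = s1.length ∧ j = s2.length) from fun h => by omega]

theorem B0_digit2_end {s1 s2 : List Char} {f i j : Nat} (hi : s1.length ≤ i)
    (hj : j < s2.length) (hd : (s2[j]).isDigit = true) :
    dfsB s1 s2 (f + 1) i j 0 = (runPairs s2 j).any (fun p => dfsB s1 s2 f i p.2 (-p.1)) := by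
  simp [dfsB, show ¬ (i < s1.length) by omega, hj, hd,
    show ¬ (i = s1.length ∧ j = s2.length) from fun h => by omega]

theorem B0_alpha {s1 s2 : List Char} {f i j : Nat} (hi : i < s1.length)
    (h1 : (s1[i]).isDigit = false) (hj : j < s2.length) (h2 : (s2[j]).isDigit = false)
    (ha1 : (s1[i]).isAlpha = true) (ha2 : (s2[j]).isAlpha = true) :
    dfsB s1 s2 (f + 1) i j 0 = ((s1[i] == s2[j]) && dfsB s1 s2 f (i + 1) (j + 1) 0) := by
  simp [dfsB, hi, h1, hj, h2, ha1, ha2,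
    show ¬ (i = s1.length ∧ j = s2.length) from fun h => by omega]

theorem B0_dead_b {s1 s2 : List Char} {f i j : Nat} (hi : i < s1.length)
    (h1 : (s1[i]).isDigit = false) (hj : s2.length ≤ j) :
    dfsB s1 s2 (f + 1) i j 0 = false := by
  simp [dfsB, hi, h1, show ¬ (j < s2.length) by omega,
    show ¬ (i = s1.length ∧ j = s2.length) from fun h => by omega]

theorem B0_dead_c {s1 s2 : List Char} {f i j : Nat} (hi : i < s1.length)
    (h1 : (s1[i]).isDigit = false) (hj : j < s2.length) (h2 : (s2[j]).isDigit = false)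
    (hl : ((s1[i]).isAlpha && (s2[j]).isAlpha) = false) :
    dfsB s1 s2 (f + 1) i j 0 = false := by
  simp [dfsB, hi, h1, hj, h2, hl,
    show ¬ (i = s1.length ∧ j = s2.length) from fun h => by omega]

theorem B0_dead_d1 {s1 s2 : List Char} {f i j : Nat} (hi : s1.length ≤ i)
    (hne : ¬ (i = s1.length ∧ j = s2.length)) (hj : s2.length ≤ j) :
    dfsB s1 s2 (f + 1) i j 0 = false := by
  simp [dfsB, show ¬ (i < s1.length) by omega, show ¬ (j < s2.length) by omega, hne]

theorem B0_dead_d2 {s1 s2 : List Char} {f i j : Nat} (hi : s1.length ≤ i)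
    (hj : j < s2.length) (h2 : (s2[j]).isDigit = false) :
    dfsB s1 s2 (f + 1) i j 0 = false := by
  simp [dfsB, show ¬ (i < s1.length) by omega, hj, h2,
    show ¬ (i = s1.length ∧ j = s2.length) from fun h => by omega]

theorem main_AB (s1 s2 : List Char) (h1 : '0' ∉ s1) (h2 : '0' ∉ s2) :
    ∀ N, ∀ i j, (s1.length - i) + (s2.length - j) < N →
      ∀ r : Int, 0 ≤ r → ∀ f g, N ≤ f → N ≤ g →
        dfsA s1 s2 f i j 0 r = dfsB s1 s2 g i j r ∧
        dfsA s1 s2 f i j 1 r = dfsB s1 s2 g i j (-r) := by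
  intro N
  induction N using Nat.strong_induction_on with
  | _ N IH =>
  intro i j hm r hr f g hf hg
  have IH' : ∀ i' j', (s1.length - i') + (s2.length - j') < (s1.length - i) + (s2.length - j) →
      ∀ r' : Int, 0 ≤ r' → ∀ f' g', (s1.length - i') + (s2.length - j') < f' →
        (s1.length - i') + (s2.length - j') < g' →
        (dfsA s1 s2 f' i' j' 0 r' = dfsB s1 s2 g' i' j' r') ∧
        (dfsA s1 s2 f' i' j' 1 r' = dfsB s1 s2 g' i' j' (-r')) := by
    intro i' j' hlt r' hr' f' g' hf' hg'
    exact IH ((s1.length - i') + (s2.length - j') + 1) (by omega) i' j' (by omega) r' hr' f' g'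
      (by omega) (by omega)
  obtain ⟨fa, rfl⟩ : ∃ x, f = x + 1 := ⟨f - 1, by omega⟩
  obtain ⟨gb, rfl⟩ : ∃ x, g = x + 1 := ⟨g - 1, by omega⟩
  have hfa : (s1.length - i) + (s2.length - j) ≤ fa := by omega
  have hgb : (s1.length - i) + (s2.length - j) ≤ gb := by omega
  constructor
  · -- which = 0 : dfsA (fa+1) i j 0 r = dfsB (gb+1) i j r
    rcases lt_trichotomy j s2.length with hjlt | hjeq | hjgt
    · by_cases hA2 : (s2[j]'hjlt).isAlpha = true
      · -- s2[j] is a letter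
        by_cases hr0 : r = 0
        · subst hr0
          by_cases hi : i < s1.length
          · by_cases hia : (s1[i]'hi).isAlpha = true
            · rw [A0_alpha_match hjlt hA2 hi hia,
                B0_alpha hi (alpha_not_digit hia) hjlt (alpha_not_digit hA2) hia hA2]
              cases hbeq : (s1[i]'hi == s2[j]'hjlt) with
              | true =>
                simp only [if_true, Bool.true_and]
                exact (IH' (i+1) (j+1) (by omega) 0 le_rfl fa gb (by omega) (by omega)).1
              | false => simp
            · have hia' : (s1[i]'hi).isAlpha = false := by simpa using hia
              by_cases hid : (s1[i]'hi).isDigit = true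
              · -- pre-charge: A consumes s2's letter first, B parses s1's run first
                rw [A0_alpha_digit hjlt hA2 hi hia' hid]
                obtain ⟨fa', rfl⟩ : ∃ x, fa = x + 1 := ⟨fa - 1, by omega⟩
                rw [Astep1_digit hi hia' hid, B0_digit1 hi hid]
                obtain ⟨gb', rfl⟩ : ∃ x, gb = x + 1 := ⟨gb - 1, by omega⟩
                apply anyCongr; intro p hp
                obtain ⟨hp1, hp2⟩ := runPairs_mem hp
                have hp3 := runPairs_pos h1 hp
                rw [Bpos_alpha (by omega) hjlt (alpha_not_digit hA2) hA2]
                have e1 : (decide ((1:Int) > p.1)) = false := by simp; omega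
                have e2 : (decide ((1:Int) ≤ p.1)) = true := by simp; omega
                rw [e1, e2]
                simp only [Bool.and_false, Bool.false_or, Bool.and_true]
                exact (IH' p.2 (j+1) (by omega) (p.1 - 1) (by omega) fa' gb' (by omega) (by omega)).1
              · have hid' : (s1[i]'hi).isDigit = false := by simpa using hid
                rw [A0_alpha_dead_hi hjlt hA2 hi hia' hid',
                  B0_dead_c hi hid' hjlt (alpha_not_digit hA2) (by simp [hia'])]
          · rw [A0_alpha_dead_end hjlt hA2 (by omega),
              B0_dead_d2 (by omega) hjlt (alpha_not_digit hA2)]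
        · have hrp : 0 < r := by omega
          rw [A0_alpha_rest hjlt hA2 hrp, Bpos_alpha hrp hjlt (alpha_not_digit hA2) hA2]
          exact (IH' i (j+1) (by omega) (r-1) (by omega) fa gb (by omega) (by omega)).1
      · have hA2' : (s2[j]'hjlt).isAlpha = false := by simpa using hA2
        by_cases hD2 : (s2[j]'hjlt).isDigit = true
        · -- s2[j] is a digit
          rw [Astep0_digit hjlt hA2' hD2]
          by_cases hr0 : r = 0
          · subst hr0
            by_cases hi : i < s1.length
            · by_cases hid : (s1[i]'hi).isDigit = true
              · -- both sides sit on digit runs: the two parse orders commute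
                rw [B0_digit1 hi hid]
                obtain ⟨gb', rfl⟩ : ∃ x, gb = x + 1 := ⟨gb - 1, by omega⟩
                have hL : ((runPairs s2 j).any (fun p =>
                      (decide ((0:Int) > p.1) && dfsA s1 s2 fa i p.2 0 (0 - p.1)) ||
                      (decide (p.1 ≥ (0:Int)) && dfsA s1 s2 fa i p.2 1 (p.1 - 0)))) =
                    ((runPairs s2 j).any (fun p2 => (runPairs s1 i).any (fun p1 =>
                      dfsB s1 s2 gb' p1.2 p2.2 (p1.1 - p2.1)))) := by
                  apply anyCongr; intro p2 hp2
                  obtain ⟨hq1, hq2⟩ := runPairs_mem hp2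
                  have hq3 := runPairs_pos h2 hp2
                  have e1 : (decide ((0:Int) > p2.1)) = false := by simp; omega
                  have e2 : (decide (p2.1 ≥ (0:Int))) = true := by simp; omega
                  rw [e1, e2]
                  simp only [Bool.false_and, Bool.false_or, Bool.true_and, sub_zero]
                  rw [(IH' i p2.2 (by omega) p2.1 (by omega) fa (gb' + 1) (by omega) (by omega)).2,
                    Bneg_digit (by omega) hi hid]
                  apply anyCongr; intro p1 hp1
                  congr 1
                  ring
                have hR : ((runPairs s1 i).any (fun p => dfsB s1 s2 (gb' + 1) p.2 j p.1)) =
                    ((runPairs s1 i).any (fun p1 => (runPairs s2 j).any (fun p2 =>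
                      dfsB s1 s2 gb' p1.2 p2.2 (p1.1 - p2.1)))) := by
                  apply anyCongr; intro p1 hp1
                  have hq3 := runPairs_pos h1 hp1
                  rw [Bpos_digit (by omega) hjlt hD2]
                rw [hL, hR, anySwap]
              · have hid' : (s1[i]'hi).isDigit = false := by simpa using hid
                rw [B0_digit2_nd hi hid' hjlt hD2]
                apply anyCongr; intro p hp
                obtain ⟨hp1, hp2⟩ := runPairs_mem hp
                have hp3 := runPairs_pos h2 hp
                have e1 : (decide ((0:Int) > p.1)) = false := by simp; omega
                have e2 : (decide (p.1 ≥ (0:Int))) = true := by simp; omega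
                rw [e1, e2]
                simp only [Bool.false_and, Bool.false_or, Bool.true_and, sub_zero]
                exact (IH' i p.2 (by omega) p.1 (by omega) fa gb (by omega) (by omega)).2
            · rw [B0_digit2_end (by omega) hjlt hD2]
              apply anyCongr; intro p hp
              obtain ⟨hp1, hp2⟩ := runPairs_mem hp
              have hp3 := runPairs_pos h2 hp
              have e1 : (decide ((0:Int) > p.1)) = false := by simp; omega
              have e2 : (decide (p.1 ≥ (0:Int))) = true := by simp; omega
              rw [e1, e2]
              simp only [Bool.false_and, Bool.false_or, Bool.true_and, sub_zero]
              exact (IH' i p.2 (by omega) p.1 (by omega) fa gb (by omega) (by omega)).2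
          · have hrp : 0 < r := by omega
            rw [Bpos_digit hrp hjlt hD2]
            apply anyCongr; intro p hp
            obtain ⟨hp1, hp2⟩ := runPairs_mem hp
            have hp3 := runPairs_pos h2 hp
            by_cases hgt : r > p.1
            · have e1 : (decide (r > p.1)) = true := by simpa using hgt
              have e2 : (decide (p.1 ≥ r)) = false := by simp; omega
              rw [e1, e2]
              simp only [Bool.true_and, Bool.false_and, Bool.or_false]
              exact (IH' i p.2 (by omega) (r - p.1) (by omega) fa gb (by omega) (by omega)).1
            · have e1 : (decide (r > p.1)) = false := by simp; omega
              have e2 : (decide (p.1 ≥ r)) = true := by simp; omega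
              rw [e1, e2]
              simp only [Bool.false_and, Bool.false_or, Bool.true_and]
              rw [(IH' i p.2 (by omega) (p.1 - r) (by omega) fa gb (by omega) (by omega)).2,
                neg_sub]
        · have hD2' : (s2[j]'hjlt).isDigit = false := by simpa using hD2
          rw [A0_bad hjlt hA2' hD2']
          by_cases hr0 : r = 0
          · subst hr0
            by_cases hi : i < s1.length
            · by_cases hid : (s1[i]'hi).isDigit = true
              · rw [B0_digit1 hi hid]
                symm
                rw [List.any_eq_false]
                intro p hp
                have hp3 := runPairs_pos h1 hp
                simp [Bdead_pos_bad (show (0:Int) < p.1 by omega) hjlt hD2' hA2']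
              · have hid' : (s1[i]'hi).isDigit = false := by simpa using hid
                rw [B0_dead_c hi hid' hjlt hD2' (by simp [hA2'])]
            · rw [B0_dead_d2 (by omega) hjlt hD2']
          · rw [Bdead_pos_bad (by omega) hjlt hD2' hA2']
    · -- j = s2.length
      rw [A0_end hjeq]
      by_cases hr0 : r = 0
      · subst hr0
        by_cases him : i = s1.length
        · rw [B0_done him hjeq]; simp [him]
        · have hB : dfsB s1 s2 (gb + 1) i j 0 = false := by
            by_cases hi : i < s1.length
            · by_cases hid : (s1[i]'hi).isDigit = true
              · rw [B0_digit1 hi hid, List.any_eq_false]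
                intro p hp
                have hp3 := runPairs_pos h1 hp
                simp [Bdead_pos (show (0:Int) < p.1 by omega) (show s2.length ≤ j by omega)]
              · have hid' : (s1[i]'hi).isDigit = false := by simpa using hid
                rw [B0_dead_b hi hid' (by omega)]
            · rw [B0_dead_d1 (by omega) (fun h => him h.1) (by omega)]
          rw [hB]; simp [him]
      · rw [Bdead_pos (by omega) (by omega)]; simp [hr0]
    · -- j > s2.length
      rw [A0_oob hjgt]
      by_cases hr0 : r = 0
      · subst hr0
        symm
        by_cases hi : i < s1.length
        · by_cases hid : (s1[i]'hi).isDigit = true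
          · rw [B0_digit1 hi hid, List.any_eq_false]
            intro p hp
            have hp3 := runPairs_pos h1 hp
            simp [Bdead_pos (show (0:Int) < p.1 by omega) (show s2.length ≤ j by omega)]
          · have hid' : (s1[i]'hi).isDigit = false := by simpa using hid
            rw [B0_dead_b hi hid' (by omega)]
        · rw [B0_dead_d1 (by omega) (fun h => by omega) (by omega)]
      · rw [Bdead_pos (by omega) (by omega)]
  · -- which = 1 : dfsA (fa+1) i j 1 r = dfsB (gb+1) i j (-r)
    rcases lt_trichotomy i s1.length with hilt | hieq | higt
    · by_cases hA1 : (s1[i]'hilt).isAlpha = true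
      · -- s1[i] is a letter
        by_cases hr0 : r = 0
        · subst hr0
          rw [show (-(0:Int)) = 0 by ring]
          by_cases hj : j < s2.length
          · by_cases hja : (s2[j]'hj).isAlpha = true
            · rw [A1_alpha_match hilt hA1 hj hja,
                B0_alpha hilt (alpha_not_digit hA1) hj (alpha_not_digit hja) hA1 hja]
              cases hbeq : (s1[i]'hilt == s2[j]'hj) with
              | true =>
                simp only [if_true, Bool.true_and]
                exact (IH' (i+1) (j+1) (by omega) 0 le_rfl fa gb (by omega) (by omega)).1
              | false => simp
            · have hja' : (s2[j]'hj).isAlpha = false := by simpa using hja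
              by_cases hjd : (s2[j]'hj).isDigit = true
              · -- pre-charge: A consumes s1's letter first, B parses s2's run first
                rw [A1_alpha_digit hilt hA1 hj hja' hjd]
                obtain ⟨fa', rfl⟩ : ∃ x, fa = x + 1 := ⟨fa - 1, by omega⟩
                rw [Astep0_digit hj hja' hjd, B0_digit2_nd hilt (alpha_not_digit hA1) hj hjd]
                obtain ⟨gb', rfl⟩ : ∃ x, gb = x + 1 := ⟨gb - 1, by omega⟩
                apply anyCongr; intro p hp
                obtain ⟨hp1, hp2⟩ := runPairs_mem hp
                have hp3 := runPairs_pos h2 hp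
                rw [Bneg_alpha (by omega) hilt (alpha_not_digit hA1) hA1]
                have e1 : (decide ((1:Int) > p.1)) = false := by simp; omega
                have e2 : (decide (p.1 ≥ (1:Int))) = true := by simp; omega
                rw [e1, e2]
                simp only [Bool.false_and, Bool.false_or, Bool.true_and]
                rw [(IH' (i+1) p.2 (by omega) (p.1 - 1) (by omega) fa' gb' (by omega) (by omega)).2]
                congr 1
                ring
              · have hjd' : (s2[j]'hj).isDigit = false := by simpa using hjd
                rw [A1_alpha_dead_hj hilt hA1 hj hja' hjd',
                  B0_dead_c hilt (alpha_not_digit hA1) hj hjd' (by simp [hja'])]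
          · rw [A1_alpha_dead_end hilt hA1 (by omega),
              B0_dead_b hilt (alpha_not_digit hA1) (by omega)]
        · have hrp : 0 < r := by omega
          rw [A1_alpha_rest hilt hA1 hrp,
            Bneg_alpha (by omega) hilt (alpha_not_digit hA1) hA1]
          rw [(IH' (i+1) j (by omega) (r-1) (by omega) fa gb (by omega) (by omega)).2]
          congr 1
          ring
      · have hA1' : (s1[i]'hilt).isAlpha = false := by simpa using hA1
        by_cases hD1 : (s1[i]'hilt).isDigit = true
        · -- s1[i] is a digit
          rw [Astep1_digit hilt hA1' hD1]
          by_cases hr0 : r = 0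
          · subst hr0
            rw [show (-(0:Int)) = 0 by ring, B0_digit1 hilt hD1]
            apply anyCongr; intro p hp
            obtain ⟨hp1, hp2⟩ := runPairs_mem hp
            have hp3 := runPairs_pos h1 hp
            have e1 : (decide ((0:Int) > p.1)) = false := by simp; omega
            have e2 : (decide ((0:Int) ≤ p.1)) = true := by simp; omega
            rw [e1, e2]
            simp only [Bool.and_false, Bool.false_or, Bool.and_true, sub_zero]
            exact (IH' p.2 j (by omega) p.1 (by omega) fa gb (by omega) (by omega)).1
          · have hrp : 0 < r := by omega
            rw [Bneg_digit (by omega) hilt hD1]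
            apply anyCongr; intro p hp
            obtain ⟨hp1, hp2⟩ := runPairs_mem hp
            have hp3 := runPairs_pos h1 hp
            by_cases hgt : r > p.1
            · have e1 : (decide (r > p.1)) = true := by simpa using hgt
              have e2 : (decide (r ≤ p.1)) = false := by simp; omega
              rw [e1, e2]
              simp only [Bool.and_true, Bool.and_false, Bool.or_false]
              rw [(IH' p.2 j (by omega) (r - p.1) (by omega) fa gb (by omega) (by omega)).2]
              congr 1
              ring
            · have e1 : (decide (r > p.1)) = false := by simp; omega
              have e2 : (decide (r ≤ p.1)) = true := by simp; omega
              rw [e1, e2]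
              simp only [Bool.and_false, Bool.false_or, Bool.and_true]
              rw [(IH' p.2 j (by omega) (p.1 - r) (by omega) fa gb (by omega) (by omega)).1]
              congr 1
              ring
        · have hD1' : (s1[i]'hilt).isDigit = false := by simpa using hD1
          rw [A1_bad hilt hA1' hD1']
          by_cases hr0 : r = 0
          · subst hr0
            rw [show (-(0:Int)) = 0 by ring]
            symm
            by_cases hj : j < s2.length
            · by_cases hjd : (s2[j]'hj).isDigit = true
              · rw [B0_digit2_nd hilt hD1' hj hjd, List.any_eq_false]
                intro p hp
                have hp3 := runPairs_pos h2 hp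
                simp [Bdead_neg_bad (show (-p.1:Int) < 0 by omega) hilt hD1' hA1']
              · have hjd' : (s2[j]'hj).isDigit = false := by simpa using hjd
                rw [B0_dead_c hilt hD1' hj hjd' (by simp [hA1'])]
            · rw [B0_dead_b hilt hD1' (by omega)]
          · rw [Bdead_neg_bad (by omega) hilt hD1' hA1']
    · -- i = s1.length
      rw [A1_end hieq]
      by_cases hr0 : r = 0
      · subst hr0
        rw [show (-(0:Int)) = 0 by ring]
        by_cases hjm : j = s2.length
        · rw [B0_done hieq hjm]; simp [hjm]
        · have hB : dfsB s1 s2 (gb + 1) i j 0 = false := by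
            by_cases hj : j < s2.length
            · by_cases hjd : (s2[j]'hj).isDigit = true
              · rw [B0_digit2_end (by omega) hj hjd, List.any_eq_false]
                intro p hp
                have hp3 := runPairs_pos h2 hp
                simp [Bdead_neg (show (-p.1:Int) < 0 by omega) (show s1.length ≤ i by omega)]
              · have hjd' : (s2[j]'hj).isDigit = false := by simpa using hjd
                rw [B0_dead_d2 (by omega) hj hjd']
            · rw [B0_dead_d1 (by omega) (fun h => hjm h.2) (by omega)]
          rw [hB]; simp [hjm]
      · rw [Bdead_neg (by omega) (by omega)]; simp [hr0]
    · -- i > s1.length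
      rw [A1_oob higt]
      by_cases hr0 : r = 0
      · subst hr0
        rw [show (-(0:Int)) = 0 by ring]
        symm
        by_cases hj : j < s2.length
        · by_cases hjd : (s2[j]'hj).isDigit = true
          · rw [B0_digit2_end (by omega) hj hjd, List.any_eq_false]
            intro p hp
            have hp3 := runPairs_pos h2 hp
            simp [Bdead_neg (show (-p.1:Int) < 0 by omega) (show s1.length ≤ i by omega)]
          · have hjd' : (s2[j]'hj).isDigit = false := by simpa using hjd
            rw [B0_dead_d2 (by omega) hj hjd']
        · rw [B0_dead_d1 (by omega) (fun h => by omega) (by omega)]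
      · rw [Bdead_neg (by omega) (by omega)]

-- ===== bridge: the BFS port equals dfsB =====

-- one recursive unfolding of dfsB is exactly "goal reached, or some successor succeeds"
theorem dfsB_char (s1 s2 : List Char) (f : Nat) (i j : Nat) (d : Int) :
    dfsB s1 s2 (f + 1) i j d =
      (decide (i = s1.length ∧ j = s2.length ∧ d = 0) ||
        (pvSuccs s1 s2 (i, j, d)).any (fun s => dfsB s1 s2 f s.1 s.2.1 s.2.2)) := by
  have hmap : ∀ (L : List (Int × Nat)) (g : Int × Nat → Nat × Nat × Int),
      (L.map g).any (fun s => dfsB s1 s2 f s.1 s.2.1 s.2.2) =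
        L.any (fun p => dfsB s1 s2 f (g p).1 (g p).2.1 (g p).2.2) := by
    intro L g
    rw [List.any_map]
    exact anyCongr (fun p _ => rfl)
  rcases lt_trichotomy d 0 with hd | hd | hd
  · have hng : decide (i = s1.length ∧ j = s2.length ∧ d = 0) = false := by
      simp; intro _ _; omega
    rw [hng, Bool.false_or]
    by_cases hi : i < s1.length
    · by_cases h1 : (s1[i]).isDigit = true
      · rw [Bneg_digit hd hi h1]
        simp only [pvSuccs, show ¬ d > 0 by omega, if_false, hd, if_true, dif_pos hi, h1,
          if_true, hmap]
      · have h1' : (s1[i]).isDigit = false := by simpa using h1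
        by_cases h2 : (s1[i]).isAlpha = true
        · rw [Bneg_alpha hd hi h1' h2]
          simp [pvSuccs, show ¬ d > 0 by omega, hd, hi, h1', h2]
        · have h2' : (s1[i]).isAlpha = false := by simpa using h2
          rw [Bdead_neg_bad hd hi h1' h2']
          simp [pvSuccs, show ¬ d > 0 by omega, hd, hi, h1', h2']
    · rw [Bdead_neg hd (by omega)]
      simp [pvSuccs, show ¬ d > 0 by omega, hd, hi]
  · subst hd
    by_cases hg : i = s1.length ∧ j = s2.length
    · rw [B0_done hg.1 hg.2]
      simp [hg.1, hg.2]
    · have hng : decide (i = s1.length ∧ j = s2.length ∧ (0:Int) = 0) = false := by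
        simp only [and_true, decide_eq_false_iff_not]; exact hg
      rw [hng, Bool.false_or]
      by_cases hi : i < s1.length
      · by_cases h1 : (s1[i]).isDigit = true
        · rw [B0_digit1 hi h1]
          simp only [pvSuccs, lt_irrefl, if_false, dif_pos hi, h1, if_true, hmap]
        · have h1' : (s1[i]).isDigit = false := by simpa using h1
          by_cases hj : j < s2.length
          · by_cases h2 : (s2[j]).isDigit = true
            · rw [B0_digit2_nd hi h1' hj h2]
              simp only [pvSuccs, lt_irrefl, if_false, dif_pos hi, h1', Bool.false_eq_true,
                dif_pos hj, h2, if_true, hmap]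
            · have h2' : (s2[j]).isDigit = false := by simpa using h2
              by_cases ha : ((s1[i]).isAlpha && (s2[j]).isAlpha) = true
              · obtain ⟨ha1, ha2⟩ := Bool.and_eq_true_iff.mp ha
                rw [B0_alpha hi h1' hj h2' ha1 ha2]
                cases hbeq : (s1[i] == s2[j]) with
                | true => simp [pvSuccs, hi, h1', hj, h2', ha1, ha2, hbeq]
                | false => simp [pvSuccs, hi, h1', hj, h2', ha1, ha2, hbeq]
              · have ha' : ((s1[i]).isAlpha && (s2[j]).isAlpha) = false := by simpa using ha
                rw [B0_dead_c hi h1' hj h2' ha']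
                rcases Bool.and_eq_false_iff.mp ha' with h | h <;>
                  simp [pvSuccs, hi, h1', hj, h2', h]
          · rw [B0_dead_b hi h1' (by omega)]
            simp [pvSuccs, hi, h1', hj]
      · by_cases hj : j < s2.length
        · by_cases h2 : (s2[j]).isDigit = true
          · rw [B0_digit2_end (by omega) hj h2]
            simp only [pvSuccs, lt_irrefl, if_false, dif_neg hi, dif_pos hj, h2, if_true, hmap]
          · have h2' : (s2[j]).isDigit = false := by simpa using h2
            rw [B0_dead_d2 (by omega) hj h2']
            simp [pvSuccs, hi, hj, h2']
        · rw [B0_dead_d1 (by omega) (fun h => hg ⟨h.1, h.2⟩) (by omega)]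
          simp [pvSuccs, hi, hj]
  · have hng : decide (i = s1.length ∧ j = s2.length ∧ d = 0) = false := by
      simp; intro _ _; omega
    rw [hng, Bool.false_or]
    by_cases hj : j < s2.length
    · by_cases h1 : (s2[j]).isDigit = true
      · rw [Bpos_digit hd hj h1]
        simp only [pvSuccs, hd, if_true, dif_pos hj, h1, hmap]
      · have h1' : (s2[j]).isDigit = false := by simpa using h1
        by_cases h2 : (s2[j]).isAlpha = true
        · rw [Bpos_alpha hd hj h1' h2]
          simp [pvSuccs, hd, hj, h1', h2]
        · have h2' : (s2[j]).isAlpha = false := by simpa using h2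
          rw [Bdead_pos_bad hd hj h1' h2']
          simp [pvSuccs, hd, hj, h1', h2']
    · rw [Bdead_pos hd (by omega)]
      simp [pvSuccs, hd, hj]

theorem mem_foldl_update {α : Type} [BEq α] [LawfulBEq α] (g : α → List α) :
    ∀ (F : List α) (acc : List α) (y : α),
      (y ∈ F.foldl (fun acc st => PySem.Set.update acc (g st)) acc) ↔
        (y ∈ acc ∨ ∃ s ∈ F, y ∈ g s) := by
  intro F
  induction F with
  | nil => intro acc y; simp
  | cons a F ih =>
    intro acc y
    simp only [List.foldl_cons, ih, PySem.Set.mem_update, List.mem_cons]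
    constructor
    · rintro ((h | h) | ⟨s, hs, hy⟩)
      · exact Or.inl h
      · exact Or.inr ⟨a, Or.inl rfl, h⟩
      · exact Or.inr ⟨s, Or.inr hs, hy⟩
    · rintro (h | ⟨s, (rfl | hs), hy⟩)
      · exact Or.inl (Or.inl h)
      · exact Or.inl (Or.inr hy)
      · exact Or.inr ⟨s, hs, hy⟩

theorem mem_pvStepSet {s1 s2 : List Char} {F : List (Nat × Nat × Int)}
    {y : Nat × Nat × Int} :
    y ∈ pvStepSet s1 s2 F ↔ ∃ s ∈ F, y ∈ pvSuccs s1 s2 s := by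
  unfold pvStepSet
  rw [mem_foldl_update]
  simp [PySem.Set.empty]

theorem contains_goal {s1 s2 : List Char} {F : List (Nat × Nat × Int)} :
    F.contains (s1.length, s2.length, (0 : Int)) =
      F.any (fun s => decide (s.1 = s1.length ∧ s.2.1 = s2.length ∧ s.2.2 = 0)) := by
  rw [Bool.eq_iff_iff, List.contains_iff_mem, List.any_eq_true]
  constructor
  · intro h; exact ⟨_, h, by simp⟩
  · rintro ⟨s, hs, h⟩
    simp only [decide_eq_true_eq] at h
    obtain ⟨a, b, c⟩ := h
    have : s = (s1.length, s2.length, (0 : Int)) := by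
      cases s with | mk x y => cases y with | mk u v => simp_all
    exact this ▸ hs

-- the BFS layer loop computes "some frontier state succeeds" for the diff recursion
theorem pvBfs_eq_dfsB (s1 s2 : List Char) :
    ∀ (t : Nat) (F : List (Nat × Nat × Int)),
      pvBfs s1 s2 t F = F.any (fun s => dfsB s1 s2 (t + 1) s.1 s.2.1 s.2.2) := by
  intro t
  induction t with
  | zero =>
    intro F
    show F.contains _ = _
    rw [contains_goal]
    apply anyCongr
    intro s _
    rw [dfsB_char]
    have : dfsB s1 s2 0 = fun _ _ _ => false := rfl
    simp [this]
  | succ t ih =>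
    intro F
    show (if F.contains (s1.length, s2.length, (0:Int)) then true
          else pvBfs s1 s2 t (pvStepSet s1 s2 F)) = _
    by_cases hc : F.contains (s1.length, s2.length, (0 : Int)) = true
    · rw [if_pos hc]
      symm
      rw [List.any_eq_true]
      refine ⟨(s1.length, s2.length, 0), List.contains_iff_mem.mp hc, ?_⟩
      exact B0_done rfl rfl
    · rw [if_neg hc, ih]
      have hng : ∀ s ∈ F, ¬ (s.1 = s1.length ∧ s.2.1 = s2.length ∧ s.2.2 = (0:Int)) := by
        intro s hs h
        apply hc
        rw [contains_goal, List.any_eq_true]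
        exact ⟨s, hs, by simp [h.1, h.2.1, h.2.2]⟩
      have hR : F.any (fun s => dfsB s1 s2 (t + 1 + 1) s.1 s.2.1 s.2.2) =
          F.any (fun s => (pvSuccs s1 s2 (s.1, s.2.1, s.2.2)).any
            (fun s' => dfsB s1 s2 (t + 1) s'.1 s'.2.1 s'.2.2)) := by
        apply anyCongr
        intro s hs
        rw [dfsB_char]
        simp [hng s hs]
      rw [hR, Bool.eq_iff_iff, List.any_eq_true, List.any_eq_true]
      constructor
      · rintro ⟨s', hs', h⟩
        obtain ⟨s, hsF, hsucc⟩ := mem_pvStepSet.mp hs'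
        refine ⟨s, hsF, ?_⟩
        rw [List.any_eq_true]
        exact ⟨s', by simpa using hsucc, h⟩
      · rintro ⟨s, hsF, h⟩
        rw [List.any_eq_true] at h
        obtain ⟨s', hs', h⟩ := h
        exact ⟨s', mem_pvStepSet.mpr ⟨s, hsF, by simpa using hs'⟩, h⟩

theorem alt_eq_dfsB (s1 s2 : String) :
    possiblyEquals_alt s1 s2 =
      dfsB s1.toList s2.toList (s1.toList.length + s2.toList.length + 2) 0 0 0 := by
  unfold possiblyEquals_alt
  rw [pvBfs_eq_dfsB]
  simp

-- ===== VERDICT (by name: the statement is the Claim_ definition above) =====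
theorem possiblyEquals_spec : Claim_equal_possiblyEquals := by
  intro s1 s2 _ hpre
  unfold Spec_possiblyEquals possiblyEquals
  rw [alt_eq_dfsB]
  exact (main_AB s1.toList s2.toList hpre.1 hpre.2
    (s1.toList.length + s2.toList.length + 1) 0 0 (by omega) 0 le_rfl _ _ le_rfl (by omega)).1
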